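-- pv_equiv track=rewrite | github.com/Ainzw0rth/cebokers | FA.py | isVariable
-- ===== SOURCE A (Python) =====
-- def state0var(c):
--     if ord(c) == 95:
--         state = 1
--     elif ord(c) == 36:
--         state = 1
--     elif ord(c) >= 65 and ord(c) <= 90:
--         state = 1
--     elif ord(c) >= 97 and ord(c) <= 122:
--         state = 1
--     else:
--         state = 2
--
--     return state
--
-- def state1var(c):
--     if ord(c) == 95:
--         state = 1
--     elif ord(c) == 36:
--         state = 1
--     elif ord(c) >= 48 and ord(c) <= 57:
--         state = 1
--     elif ord(c) >= 65 and ord(c) <= 90: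
--         state = 1
--     elif ord(c) >= 97 and ord(c) <= 122:
--         state = 1
--     else:
--         state = 2
--
--     return state
--
-- def state2var(c):
--     state = 2
--
--     return state
--
-- def isVariable(s):
--     state = 0
--     for i in range (len(s)):
--         if (state == 0):
--             state = state0var(s[i])
--         if (state == 1):
--             state = state1var(s[i])
--         if (state == 2):
--             state = state2var(s[i])
--     if (state == 1):
--         return True
--     else :
--         return False
-- ===== SOURCE B (Python) =====
-- ALLOWED = set("ABCDEFGHIJKLMNOPQRSTUVWXYZabcdefghijklmnopqrstuvwxyz0123456789_$")
-- DIGITS = set("0123456789")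
--
-- def isVariable(s):
--     # A legal identifier uses only characters from ALLOWED, and its first
--     # character must not be a digit (start chars = ALLOWED minus DIGITS).
--     return bool(s) and s[0] not in DIGITS and set(s) <= ALLOWED
-- ===== Notes on version B (the rewrite author's own statement) =====
-- stated objective: faster
-- what changed: Replaced the three-state DFA loop with a set characterisation: build set(s) once and test it as a subset of the allowed-character set, plus one membership test that the first character is not a digit.
import Mathlib
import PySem

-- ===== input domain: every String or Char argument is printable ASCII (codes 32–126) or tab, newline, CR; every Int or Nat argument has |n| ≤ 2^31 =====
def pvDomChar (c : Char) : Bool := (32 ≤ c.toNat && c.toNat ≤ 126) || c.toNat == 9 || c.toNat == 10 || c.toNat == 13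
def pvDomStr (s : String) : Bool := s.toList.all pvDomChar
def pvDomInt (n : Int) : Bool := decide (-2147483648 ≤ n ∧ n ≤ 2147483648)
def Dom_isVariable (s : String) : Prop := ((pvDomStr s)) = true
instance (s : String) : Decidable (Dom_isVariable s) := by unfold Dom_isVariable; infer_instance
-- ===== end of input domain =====

-- Header: B replaces A's three-state DFA loop by a set characterisation — set(s) ⊆ allowed
-- characters plus "first char is not a digit" (alternative formulation, same cost).

-- ===== PORT A =====
def state0var (c : Char) : Int :=
  if c.toNat = 95 then 1
  else if c.toNat = 36 then 1
  else if 65 ≤ c.toNat ∧ c.toNat ≤ 90 then 1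
  else if 97 ≤ c.toNat ∧ c.toNat ≤ 122 then 1
  else 2

def state1var (c : Char) : Int :=
  if c.toNat = 95 then 1
  else if c.toNat = 36 then 1
  else if 48 ≤ c.toNat ∧ c.toNat ≤ 57 then 1
  else if 65 ≤ c.toNat ∧ c.toNat ≤ 90 then 1
  else if 97 ≤ c.toNat ∧ c.toNat ≤ 122 then 1
  else 2

def state2var (_c : Char) : Int := 2

def isVariableStep (state : Int) (c : Char) : Int :=
  let state := if state = 0 then state0var c else state
  let state := if state = 1 then state1var c else state
  let state := if state = 2 then state2var c else state
  state

def isVariable (s : String) : Bool :=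
  let state := s.toList.foldl isVariableStep 0
  if state = 1 then true else false

-- ===== PORT B =====
def pvALLOWED : PySem.Set Char :=
  PySem.Set.ofList "ABCDEFGHIJKLMNOPQRSTUVWXYZabcdefghijklmnopqrstuvwxyz0123456789_$".toList

def pvDIGITS : PySem.Set Char :=
  PySem.Set.ofList "0123456789".toList

def isVariable_alt (s : String) : Bool :=
  match s.toList with
  | [] => false
  | c :: _ =>
      !(PySem.Set.contains pvDIGITS c) &&
        PySem.Set.issubset (PySem.Set.ofList s.toList) pvALLOWED

-- ===== PRECONDITION & SPEC =====
def Spec_isVariable (s : String) (out : Bool) : Prop := out = isVariable_alt s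
instance (s : String) (out : Bool) : Decidable (Spec_isVariable s out) := by unfold Spec_isVariable; infer_instance

-- ===== CLAIM (what is proved, stated in full; the proofs are below) =====
def Claim_equal_isVariable : Prop := ∀ (s : String), Dom_isVariable s → Spec_isVariable s (isVariable s)

-- ===== LEMMAS AND PROOFS =====

-- proof-only character predicates (B itself does not use them)
def contP (c : Char) : Bool :=
  decide (c.toNat = 95) || decide (c.toNat = 36) ||
  (decide (48 ≤ c.toNat) && decide (c.toNat ≤ 57)) ||
  (decide (65 ≤ c.toNat) && decide (c.toNat ≤ 90)) ||
  (decide (97 ≤ c.toNat) && decide (c.toNat ≤ 122))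

def digP (c : Char) : Bool := decide (48 ≤ c.toNat) && decide (c.toNat ≤ 57)

set_option maxRecDepth 8192 in
theorem contains_allowed (c : Char) (h : c.toNat ≤ 126) :
    PySem.Set.contains pvALLOWED c = contP c := by
  have hall : ∀ n ∈ List.range 127,
      PySem.Set.contains pvALLOWED (Char.ofNat n) = contP (Char.ofNat n) := by decide
  have := hall c.toNat (by simp [List.mem_range]; omega)
  rwa [Char.ofNat_toNat] at this

set_option maxRecDepth 8192 in
theorem contains_digits (c : Char) (h : c.toNat ≤ 126) :
    PySem.Set.contains pvDIGITS c = digP c := by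
  have hall : ∀ n ∈ List.range 127,
      PySem.Set.contains pvDIGITS (Char.ofNat n) = digP (Char.ofNat n) := by decide
  have := hall c.toNat (by simp [List.mem_range]; omega)
  rwa [Char.ofNat_toNat] at this

theorem state1_eq (c : Char) : state1var c = (if contP c then (1:Int) else 2) := by
  simp only [state1var, contP]
  split_ifs <;> simp_all <;> try omega

theorem step_one (c : Char) : isVariableStep 1 c = (if contP c then 1 else 2) := by
  simp only [isVariableStep, state1_eq, state2var]
  by_cases h : contP c <;> simp [h]

theorem step_two (c : Char) : isVariableStep 2 c = 2 := by
  simp [isVariableStep, state2var]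

theorem fold_two (l : List Char) : l.foldl isVariableStep 2 = 2 := by
  induction l with
  | nil => rfl
  | cons c l ih => simp [List.foldl, step_two, ih]

theorem fold_one (l : List Char) :
    l.foldl isVariableStep 1 = (if l.all contP then 1 else 2) := by
  induction l with
  | nil => rfl
  | cons c l ih =>
    simp only [List.foldl, step_one, List.all_cons]
    by_cases h : contP c <;> simp [h, ih, fold_two]

theorem state0_eq (c : Char) :
    state0var c = (if contP c && !digP c then (1:Int) else 2) := by
  simp only [state0var, contP, digP]
  split_ifs <;> simp_all <;> try omega

theorem step_zero (c : Char) :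
    isVariableStep 0 c = (if contP c && !digP c then 1 else 2) := by
  by_cases hs : (contP c && !digP c) = true
  · have hc : contP c = true := by
      rcases Bool.and_eq_true_iff.mp hs with ⟨h1, _⟩; exact h1
    have h1 : state1var c = 1 := by simp [state1_eq, hc]
    simp [isVariableStep, state0_eq, hs, h1]
  · simp [isVariableStep, state0_eq, hs, state2var]

theorem issubset_allowed (l : List Char) (hd : l.all pvDomChar = true) :
    PySem.Set.issubset (PySem.Set.ofList l) pvALLOWED = l.all contP := by
  by_cases h : l.all contP = true
  · rw [h]
    rw [PySem.Set.issubset_iff]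
    intro x hx
    rw [PySem.Set.mem_ofList] at hx
    have hdom : pvDomChar x = true := by
      rw [List.all_eq_true] at hd; exact hd x hx
    have hle : x.toNat ≤ 126 := by
      simp only [pvDomChar, Bool.or_eq_true, Bool.and_eq_true, decide_eq_true_eq, beq_iff_eq] at hdom
      omega
    have hc : contP x = true := by
      rw [List.all_eq_true] at h; exact h x hx
    rw [← PySem.Set.contains_iff, contains_allowed x hle, hc]
  · rw [Bool.eq_false_iff.mpr h]
    rw [Bool.eq_false_iff]
    intro hsub
    apply h
    rw [List.all_eq_true]
    intro x hx
    have hmem : x ∈ PySem.Set.ofList l := (PySem.Set.mem_ofList _ _).mpr hx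
    have := (PySem.Set.issubset_iff _ _).mp hsub x hmem
    have hdom : pvDomChar x = true := by
      rw [List.all_eq_true] at hd; exact hd x hx
    have hle : x.toNat ≤ 126 := by
      simp only [pvDomChar, Bool.or_eq_true, Bool.and_eq_true, decide_eq_true_eq, beq_iff_eq] at hdom
      omega
    rw [← contains_allowed x hle, PySem.Set.contains_iff]
    exact this

-- ===== VERDICT (by name: the statement is the Claim_ definition above) =====
theorem isVariable_spec : Claim_equal_isVariable := by
  intro s hdom
  unfold Spec_isVariable
  unfold Dom_isVariable pvDomStr at hdom
  cases h : s.toList with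
  | nil =>
    have hb : isVariable_alt s = false := by unfold isVariable_alt; rw [h]
    have ha : isVariable s = false := by unfold isVariable; rw [h]; rfl
    rw [ha, hb]
  | cons c rest =>
    rw [h] at hdom
    have hle : c.toNat ≤ 126 := by
      rw [List.all_cons, Bool.and_eq_true] at hdom
      have := hdom.1
      simp only [pvDomChar, Bool.or_eq_true, Bool.and_eq_true, decide_eq_true_eq, beq_iff_eq] at this
      omega
    have hb : isVariable_alt s =
        (!(PySem.Set.contains pvDIGITS c) &&
          PySem.Set.issubset (PySem.Set.ofList (c :: rest)) pvALLOWED) := by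
      unfold isVariable_alt; rw [h]
    have ha : isVariable s =
        (if (c :: rest).foldl isVariableStep 0 = 1 then true else false) := by
      unfold isVariable; rw [h]
    rw [ha, hb, issubset_allowed (c :: rest) hdom, contains_digits c hle]
    simp only [List.foldl, step_zero, List.all_cons]
    by_cases hc : contP c
    · by_cases hdg : digP c
      · simp [hc, hdg, fold_two]
      · simp only [hc, hdg, Bool.not_false, Bool.and_true, Bool.true_and, if_true, fold_one]
        by_cases hrest : rest.all contP <;> simp [hrest]
    · simp [hc, fold_two]
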